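-- pv_equiv track=rewrite | github.com/cppietime/Mutasic | dev_util/ebnf_parser.py | _organize_rules
-- ===== SOURCE A (Python) =====
-- def _organize_rules(tokens):
--     rules = []
--     rule = []
--     terminals = set()
--     nonterminals = set()
--     for token in tokens:
--         if token.startswith('(*'):
--             continue
--         if not rule:
--             nonterminals.add(token)
--         else:
--             if token[0] not in {',', '|', '=', ';', '[', '{', '?', ']', '}', '(', ')', '+', '*', '-'}:
--                 terminals.add(token)
--             if len(rule) == 1:
--                 assert token == '=', 'Expected assignment'
--         rule.append(token)
--         if token == ';':
--             assert len(rule) >= 3, 'Premature semicolon'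
--             rules.append(rule)
--             rule = []
--     terminals.difference_update(nonterminals)
--     return rules, terminals, nonterminals
-- ===== SOURCE B (Python) =====
-- def _organize_rules(tokens):
--     # Two-phase: filter comments, cut the stream into groups after each ';',
--     # then classify each group, with the same per-rule validation asserts.
--     toks = [t for t in tokens if not t.startswith('(*')]
--     groups = []
--     cur = []
--     for t in toks:
--         cur.append(t)
--         if t == ';':
--             groups.append(cur)
--             cur = []
--     if cur:
--         groups.append(cur)
--     ops = set(',|=;[{?]}()+*-')
--     rules = []
--     terminals = set()
--     nonterminals = set()
--     for g in groups:
--         nonterminals.add(g[0])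
--         if len(g) > 1:
--             assert g[1] == '=', 'Expected assignment'
--         for t in g[1:]:
--             if t[:1] not in ops:
--                 terminals.add(t)
--         if g[-1] == ';':
--             assert len(g) >= 3, 'Premature semicolon'
--             rules.append(g)
--     terminals.difference_update(nonterminals)
--     return rules, terminals, nonterminals
-- ===== Notes on version B (the rewrite author's own statement) =====
-- stated objective: alternative
-- what changed: Replaces A's single stateful loop (interleaving rule accumulation, classification and assertions) with a two-phase pipeline: filter comments and cut the token stream into groups after each ';', then classify each group (head -> nonterminal, tail -> terminals, append ';'-terminated groups to rules, same validation asserts); Pre_ excludes exactly the malformed streams on which A raises (AssertionError or IndexError).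
import Mathlib
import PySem

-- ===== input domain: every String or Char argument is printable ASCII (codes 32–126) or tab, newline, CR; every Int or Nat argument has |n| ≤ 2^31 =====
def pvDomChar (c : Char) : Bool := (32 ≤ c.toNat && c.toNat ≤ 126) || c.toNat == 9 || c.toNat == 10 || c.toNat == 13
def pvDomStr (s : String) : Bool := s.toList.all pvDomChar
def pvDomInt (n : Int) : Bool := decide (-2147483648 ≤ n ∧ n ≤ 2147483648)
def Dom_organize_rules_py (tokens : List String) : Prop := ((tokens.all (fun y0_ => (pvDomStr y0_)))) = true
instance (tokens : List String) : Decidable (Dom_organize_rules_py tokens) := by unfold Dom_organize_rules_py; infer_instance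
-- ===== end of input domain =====

-- B replaces A's single interleaved stateful loop by a filter / split-into-groups / classify pipeline (same cost).

-- ===== PORT A =====
-- first-char operator test: Python 'token[0] in {...}'; on token = '' Python raises
-- IndexError (such inputs are outside Pre_), the port returns false there.
def pvOpTestA (token : String) : Bool :=
  match token.toList with
  | [] => false
  | c :: _ => [',', '|', '=', ';', '[', '{', '?', ']', '}', '(', ')', '+', '*', '-'].contains c

-- loop body of A: state = (rules, rule, terminals, nonterminals); the two asserts
-- (which only raise, outside Pre_) are not modelled.
def pvStepA (st : List (List String) × List String × PySem.Set String × PySem.Set String)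
    (token : String) : List (List String) × List String × PySem.Set String × PySem.Set String :=
  if PySem.Str.startswith token "(*" then st
  else
    let tn : PySem.Set String × PySem.Set String :=
      if st.2.1.isEmpty then (st.2.2.1, PySem.Set.add st.2.2.2 token)
      else if pvOpTestA token then (st.2.2.1, st.2.2.2)
      else (PySem.Set.add st.2.2.1 token, st.2.2.2)
    let rule := st.2.1 ++ [token]
    if token = ";" then (st.1 ++ [rule], [], tn.1, tn.2)
    else (st.1, rule, tn.1, tn.2)

def organize_rules_py (tokens : List String) : List (List String) × List String × List String :=
  let r := tokens.foldl pvStepA ([], [], PySem.Set.empty, PySem.Set.empty)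
  (r.1, PySem.Set.diff r.2.2.1 r.2.2.2, r.2.2.2)

-- ===== PORT B =====
-- t[:1] (first character of t as a string, "" for t = ""); exact for this slice.
def pvPrefix1 (t : String) : String := String.ofList (t.toList.take 1)

def pvOpsB : List String := [",", "|", "=", ";", "[", "{", "?", "]", "}", "(", ")", "+", "*", "-"]

-- grouping loop of B: state = (groups, cur); cut after each ';'
def pvStepGroup (st : List (List String) × List String) (t : String) :
    List (List String) × List String :=
  let cur := st.2 ++ [t]
  if t = ";" then (st.1 ++ [cur], []) else (st.1, cur)

def pvGroups (fs : List String) : List (List String) :=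
  let r := fs.foldl pvStepGroup ([], [])
  if r.2.isEmpty then r.1 else r.1 ++ [r.2]

-- terminal-collection inner loop of B (over g[1:])
def pvAddTermB (T : PySem.Set String) (t : String) : PySem.Set String :=
  if pvOpsB.contains (pvPrefix1 t) then T else PySem.Set.add T t

-- per-group classification of B: state = (rules, terminals, nonterminals); B's two
-- asserts (which only raise, and never fire inside Pre_) are not modelled
def pvScanB (st : List (List String) × PySem.Set String × PySem.Set String) (g : List String) :
    List (List String) × PySem.Set String × PySem.Set String :=
  let N := PySem.Set.add st.2.2 (g.headD "")      -- g[0]; groups are never empty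
  let T := g.tail.foldl pvAddTermB st.2.1
  let rules := if g.getLastD "" = ";" then st.1 ++ [g] else st.1
  (rules, T, N)

def organize_rules_py_alt (tokens : List String) : List (List String) × List String × List String :=
  let fs := tokens.filter (fun t => !(PySem.Str.startswith t "(*"))
  let r := (pvGroups fs).foldl pvScanB ([], PySem.Set.empty, PySem.Set.empty)
  (r.1, PySem.Set.diff r.2.1 r.2.2, r.2.2)

-- ===== PRECONDITION & SPEC =====
-- Pre_ : exactly the inputs on which Python A returns normally. A raises on: an empty
-- token anywhere but at the start of a rule (IndexError on token[0]); a rule whose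
-- second token is not '=' (AssertionError 'Expected assignment'); a ';' as first or
-- second token of a rule (AssertionError 'Premature semicolon').
def Pre_organize_rules_py (tokens : List String) : Prop :=
  let fs := tokens.filter (fun t => !(PySem.Str.startswith t "(*"))
  ∀ j < fs.length,
    (fs.getD j "" = "" → (j = 0 ∨ fs.getD (j - 1) "" = ";")) ∧
    ((j = 0 ∨ fs.getD (j - 1) "" = ";") → j + 1 < fs.length → fs.getD (j + 1) "" = "=") ∧
    (fs.getD j "" = ";" → 2 ≤ j ∧ fs.getD (j - 1) "" ≠ ";" ∧ fs.getD (j - 2) "" ≠ ";")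
instance (tokens : List String) : Decidable (Pre_organize_rules_py tokens) := by
  unfold Pre_organize_rules_py; infer_instance

def pvWitness_organize_rules_py : List String :=
  ["expr", "=", "term", "|", "expr", ",", "term", ";", "(* comment", "term", "=", "x", ";"]

def Spec_organize_rules_py (tokens : List String) (out : List (List String) × List String × List String) : Prop := out = organize_rules_py_alt tokens
instance (tokens : List String) (out : List (List String) × List String × List String) : Decidable (Spec_organize_rules_py tokens out) := by unfold Spec_organize_rules_py; infer_instance

-- ===== CLAIM (what is proved, stated in full; the proofs are below) =====
def Claim_equal_organize_rules_py : Prop := ∀ (tokens : List String), Dom_organize_rules_py tokens → Pre_organize_rules_py tokens → Spec_organize_rules_py tokens (organize_rules_py tokens)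

-- ===== LEMMAS AND PROOFS =====

def pvCharsA : List Char := [',', '|', '=', ';', '[', '{', '?', ']', '}', '(', ')', '+', '*', '-']

-- A's op test agrees with B's (t[:1] membership among the one-char operator strings)
theorem pvOpTest_eq (t : String) : pvOpsB.contains (pvPrefix1 t) = pvOpTestA t := by
  have hinj : Function.Injective (fun c : Char => String.ofList [c]) := by
    intro a b h
    have := congrArg String.toList h
    simpa using this
  unfold pvOpTestA pvPrefix1
  cases ht : t.toList with
  | nil => rfl
  | cons c cs =>
    simp only [List.take]
    rw [show pvOpsB = pvCharsA.map (fun c => String.ofList [c]) from rfl]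
    apply Bool.eq_iff_iff.mpr
    simp only [List.contains_iff_mem, List.mem_map]
    constructor
    · rintro ⟨d, hd, he⟩
      exact (hinj he.symm) ▸ hd
    · intro h
      exact ⟨c, h, rfl⟩

theorem pvAddTermB_eq (T : PySem.Set String) (t : String) :
    pvAddTermB T t = if pvOpTestA t = true then T else PySem.Set.add T t := by
  rw [pvAddTermB, pvOpTest_eq]

-- unfolding pvStepA on a non-comment token, empty current rule
theorem pvStepA_start (rules : List (List String)) (T N : PySem.Set String) (t : String)
    (h : PySem.Str.startswith t "(*" = false) :
    pvStepA (rules, [], T, N) t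
      = if t = ";" then (rules ++ [[t]], [], T, PySem.Set.add N t)
        else (rules, [t], T, PySem.Set.add N t) := by
  rw [pvStepA, if_neg (by simpa using h)]
  by_cases ht : t = ";" <;> simp [ht]

-- unfolding pvStepA on a non-comment token, nonempty current rule
theorem pvStepA_mid (rules : List (List String)) (h' : String) (tl : List String)
    (T N : PySem.Set String) (t : String) (h : PySem.Str.startswith t "(*" = false) :
    pvStepA (rules, h' :: tl, T, N) t
      = if t = ";" then (rules ++ [h' :: tl ++ [t]], [], pvAddTermB T t, N)
        else (rules, h' :: tl ++ [t], pvAddTermB T t, N) := by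
  rw [pvStepA, if_neg (by simpa using h), pvAddTermB_eq]
  by_cases ht : t = ";"
  · subst ht
    by_cases hop : pvOpTestA ";" = true <;> simp [hop]
  · by_cases hop : pvOpTestA t = true <;> simp [ht, hop]

-- A's fold skips comments, so it equals the fold over the comment-filtered list
theorem pvFoldA_filter (l : List String)
    (st : List (List String) × List String × PySem.Set String × PySem.Set String) :
    l.foldl pvStepA st = (l.filter (fun t => !(PySem.Str.startswith t "(*"))).foldl pvStepA st := by
  induction l generalizing st with
  | nil => rfl
  | cons t ts ih =>
    rw [List.filter_cons, List.foldl_cons]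
    by_cases h : PySem.Str.startswith t "(*" = true
    · rw [if_neg (by simpa using h), show pvStepA st t = st from by rw [pvStepA, if_pos (by simpa using h)], ih]
    · simp only [Bool.not_eq_true] at h
      rw [if_pos (by simpa using h), List.foldl_cons, ih]

-- the grouping fold only appends to its groups accumulator
theorem pvFoldGroup_prefix (l : List String) (gs : List (List String)) (cur : List String) :
    l.foldl pvStepGroup (gs, cur)
      = (gs ++ (l.foldl pvStepGroup ([], cur)).1, (l.foldl pvStepGroup ([], cur)).2) := by
  induction l generalizing gs cur with
  | nil => simp
  | cons t ts ih =>
    by_cases h : t = ";"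
    · subst h
      rw [List.foldl_cons, List.foldl_cons,
        show pvStepGroup (gs, cur) ";" = (gs ++ [cur ++ [";"]], []) from by simp [pvStepGroup],
        show pvStepGroup (([], cur) : List (List String) × List String) ";"
            = ([cur ++ [";"]], []) from by simp [pvStepGroup]]
      rw [ih (gs ++ [cur ++ [";"]]) [], ih [cur ++ [";"]] []]
      simp
    · rw [List.foldl_cons, List.foldl_cons,
        show pvStepGroup (gs, cur) t = (gs, cur ++ [t]) from by simp [pvStepGroup, h],
        show pvStepGroup (([], cur) : List (List String) × List String) t
            = ([], cur ++ [t]) from by simp [pvStepGroup, h]]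
      exact ih gs (cur ++ [t])

-- groups of l started from a partial group cur (pvGroups fs = pvGroupsFrom fs [])
def pvGroupsFrom (l : List String) (cur : List String) : List (List String) :=
  let r := l.foldl pvStepGroup ([], cur)
  if r.2.isEmpty then r.1 else r.1 ++ [r.2]

theorem pvGroupsFrom_semi (ts : List String) (cur : List String) :
    pvGroupsFrom (";" :: ts) cur = (cur ++ [";"]) :: pvGroupsFrom ts [] := by
  unfold pvGroupsFrom
  rw [List.foldl_cons,
    show pvStepGroup (([], cur) : List (List String) × List String) ";"
        = ([cur ++ [";"]], []) from by simp [pvStepGroup],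
    pvFoldGroup_prefix ts [cur ++ [";"]] []]
  by_cases h : (ts.foldl pvStepGroup ([], [])).2.isEmpty <;> simp [h]

theorem pvGroupsFrom_cons (t : String) (ts : List String) (cur : List String) (h : ¬ t = ";") :
    pvGroupsFrom (t :: ts) cur = pvGroupsFrom ts (cur ++ [t]) := by
  simp [pvGroupsFrom, pvStepGroup, h]

-- the scan A has already performed on the tokens of the (';'-free) partial group cur
def pvApplyCur (cur : List String) (T N : PySem.Set String) : PySem.Set String × PySem.Set String :=
  match cur with
  | [] => (T, N)
  | h :: tl => (tl.foldl pvAddTermB T, PySem.Set.add N h)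

theorem pvGetLastD_mem (h : String) (tl : List String) : (h :: tl).getLastD "" ∈ h :: tl := by
  rw [List.getLastD_eq_getLast?, List.getLast?_eq_some_getLast (by simp)]
  exact List.getLast_mem _

-- scanB on a group ending in ';'
theorem pvScanB_semi (rules : List (List String)) (T N : PySem.Set String)
    (h : String) (tl : List String) :
    pvScanB (rules, T, N) (h :: tl ++ [";"])
      = (rules ++ [h :: tl ++ [";"]], tl.foldl pvAddTermB T, PySem.Set.add N h) := by
  have hlast : (h :: tl ++ [";"]).getLastD "" = ";" := by
    induction tl <;> simp_all [List.getLastD]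
  rw [List.getLastD_eq_getLast?] at hlast
  have hsemi : ∀ T' : PySem.Set String, pvAddTermB T' ";" = T' := by
    intro T'; rw [pvAddTermB_eq]; rfl
  simp [pvScanB, List.foldl_append, hsemi]
  exact hlast

-- MAIN INVARIANT: A's remaining fold from mid-state (rules, cur, scan of cur applied)
-- equals B's group scan of the remaining groups, started from partial group cur.
theorem pvMain (l : List String) : ∀ (cur : List String) (rules : List (List String))
    (T N : PySem.Set String),
    (∀ t ∈ l, PySem.Str.startswith t "(*" = false) → ";" ∉ cur →
    (let ra := l.foldl pvStepA (rules, cur, (pvApplyCur cur T N).1, (pvApplyCur cur T N).2)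
     (ra.1, ra.2.2.1, ra.2.2.2))
      = (pvGroupsFrom l cur).foldl pvScanB (rules, T, N) := by
  induction l with
  | nil =>
    intro cur rules T N _ hcur
    cases cur with
    | nil => rfl
    | cons h tl =>
      have hlast : ¬ (h :: tl).getLastD "" = ";" := fun he => hcur (he ▸ pvGetLastD_mem h tl)
      rw [List.getLastD_eq_getLast?] at hlast
      simp [pvGroupsFrom, pvScanB, pvApplyCur, hlast]
  | cons t ts ih =>
    intro cur rules T N hnc hcur
    have hnct : PySem.Str.startswith t "(*" = false := hnc t (by simp)
    have hncts : ∀ x ∈ ts, PySem.Str.startswith x "(*" = false := fun x hx => hnc x (by simp [hx])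
    cases cur with
    | nil =>
      by_cases ht : t = ";"
      · subst ht
        simp only [List.foldl_cons, pvApplyCur, pvStepA_start rules T N ";" hnct]
        rw [pvGroupsFrom_semi, List.foldl_cons,
          show pvScanB (rules, T, N) ([] ++ [";"]) = (rules ++ [[";"]], T, PySem.Set.add N ";")
            from by simp [pvScanB]]
        have := ih [] (rules ++ [[";"]]) T (PySem.Set.add N ";") hncts (by simp)
        simpa [pvApplyCur] using this
      · simp only [List.foldl_cons, pvApplyCur, pvStepA_start rules T N t hnct, if_neg ht]
        rw [pvGroupsFrom_cons t ts [] ht]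
        have := ih [t] rules T N hncts (by simp [Ne.symm (Ne.intro ht)])
        simpa [pvApplyCur] using this
    | cons h tl =>
      by_cases ht : t = ";"
      · subst ht
        simp only [List.foldl_cons, pvApplyCur,
          pvStepA_mid rules h tl (tl.foldl pvAddTermB T) (PySem.Set.add N h) ";" hnct]
        rw [pvGroupsFrom_semi, List.foldl_cons,
          show (h :: tl) ++ [";"] = h :: tl ++ [";"] from rfl, pvScanB_semi rules T N h tl]
        rw [show pvAddTermB (tl.foldl pvAddTermB T) ";" = tl.foldl pvAddTermB T from by
          rw [pvAddTermB_eq]; rfl]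
        have := ih [] (rules ++ [h :: tl ++ [";"]]) (tl.foldl pvAddTermB T)
          (PySem.Set.add N h) hncts (by simp)
        simpa [pvApplyCur] using this
      · simp only [List.foldl_cons, pvApplyCur,
          pvStepA_mid rules h tl (tl.foldl pvAddTermB T) (PySem.Set.add N h) t hnct, if_neg ht]
        rw [pvGroupsFrom_cons t ts (h :: tl) ht]
        have := ih (h :: tl ++ [t]) rules T N hncts (by
          intro hmem
          rcases List.mem_cons.mp hmem with hx | hx
          · exact hcur (by simp [hx])
          · rcases List.mem_append.mp hx with hx' | hx'
            · exact hcur (by simp [hx'])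
            · exact ht (List.mem_singleton.mp hx').symm)
        simpa [pvApplyCur, List.foldl_append] using this

-- ===== VERDICT (by name: the statement is the Claim_ definition above) =====
theorem organize_rules_py_spec : Claim_equal_organize_rules_py := by
  intro tokens _ _
  show organize_rules_py tokens = organize_rules_py_alt tokens
  have hmain := pvMain (tokens.filter (fun t => !(PySem.Str.startswith t "(*"))) [] []
    PySem.Set.empty PySem.Set.empty
    (by
      intro x hx
      have := (List.mem_filter.mp hx).2
      simpa using this) (by simp)
  simp only [pvApplyCur] at hmain
  simp only [organize_rules_py, organize_rules_py_alt]
  rw [pvFoldA_filter,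
    show pvGroups (tokens.filter (fun t => !(PySem.Str.startswith t "(*")))
        = pvGroupsFrom (tokens.filter (fun t => !(PySem.Str.startswith t "(*"))) [] from rfl,
    ← hmain]
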